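-- pv_equiv track=rewrite | github.com/DiagAutoClinic/DiagAutoClinicOS | shared/racelogic_parser.py | _generate_parameter_name
-- ===== SOURCE A (Python) =====
-- def _generate_parameter_name(can_id: int) -> str:
--     """Generate a generic parameter name based on CAN ID"""
--     # Common automotive CAN ID ranges and their typical parameters
--     id_ranges = {
--         (0x100, 0x1FF): ["Engine_RPM", "Engine_Load", "Throttle_Position", "Engine_Temp"],
--         (0x200, 0x2FF): ["Vehicle_Speed", "Transmission_Gear", "Brake_Pressure", "Steering_Angle"],
--         (0x300, 0x3FF): ["Fuel_Level", "Oil_Pressure", "Coolant_Pressure", "Turbo_Boost"],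
--         (0x400, 0x4FF): ["Battery_Voltage", "Alternator_Current", "Fuel_Pressure", "Idle_RPM"],
--         (0x500, 0x5FF): ["Catalyst_Temp", "O2_Sensor", "MAF_Sensor", "IAT_Sensor"],
--         (0x600, 0x6FF): ["ABS_Status", "ESP_Status", "Airbag_Status", "Central_Lock"],
--     }
--
--     for (start, end), names in id_ranges.items():
--         if start <= can_id <= end:
--             index = (can_id - start) % len(names)
--             return names[index]
--
--     return f"CAN_ID_0x{can_id:03X}"
-- ===== SOURCE B (Python) =====
-- _TABLE = [
--     ["Engine_RPM", "Engine_Load", "Throttle_Position", "Engine_Temp"],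
--     ["Vehicle_Speed", "Transmission_Gear", "Brake_Pressure", "Steering_Angle"],
--     ["Fuel_Level", "Oil_Pressure", "Coolant_Pressure", "Turbo_Boost"],
--     ["Battery_Voltage", "Alternator_Current", "Fuel_Pressure", "Idle_RPM"],
--     ["Catalyst_Temp", "O2_Sensor", "MAF_Sensor", "IAT_Sensor"],
--     ["ABS_Status", "ESP_Status", "Airbag_Status", "Central_Lock"],
-- ]
--
--
-- def _generate_parameter_name(can_id: int) -> str:
--     """Generate a generic parameter name based on CAN ID"""
--     high = can_id // 0x100
--     if 1 <= high <= 6: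
--         names = _TABLE[high - 1]
--         return names[(can_id % 0x100) % len(names)]
--     return f"CAN_ID_0x{can_id:03X}"
-- ===== Notes on version B (the rewrite author's own statement) =====
-- stated objective: idiomatic
-- what changed: Replaces the linear scan over six (start,end) range keys with direct arithmetic dispatch: high byte can_id // 0x100 indexes a precomputed table of name lists, and the low byte mod len(names) picks the name.
import Mathlib
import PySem

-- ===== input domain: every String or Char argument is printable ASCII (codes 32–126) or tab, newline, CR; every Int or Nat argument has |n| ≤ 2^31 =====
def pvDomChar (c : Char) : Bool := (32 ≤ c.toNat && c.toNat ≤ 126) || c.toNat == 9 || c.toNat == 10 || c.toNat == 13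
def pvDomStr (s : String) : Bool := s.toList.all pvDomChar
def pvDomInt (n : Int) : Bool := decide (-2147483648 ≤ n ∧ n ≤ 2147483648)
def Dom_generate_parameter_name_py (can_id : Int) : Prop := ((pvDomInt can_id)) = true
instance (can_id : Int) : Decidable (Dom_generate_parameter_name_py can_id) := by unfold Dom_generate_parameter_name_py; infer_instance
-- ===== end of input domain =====

-- B replaces A's linear scan over six range keys by arithmetic dispatch on the high byte into a precomputed table (idiomatic/alternative; same observable behaviour).


-- Shared helper: hand-port of the f-string  f"CAN_ID_0x{can_id:03X}"  (no hex formatter in PySem).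
-- Exact for Python's '{:03X}': uppercase hex digits of |n|, '-' in front for negatives, zero-padded to overall width 3.
def pvHexDigit (n : Nat) : Char := if n < 10 then Char.ofNat (48 + n) else Char.ofNat (55 + n)

def pvHexAux : Nat → List Char → List Char
  | 0, acc => acc
  | n+1, acc => pvHexAux ((n+1)/16) (pvHexDigit ((n+1)%16) :: acc)
decreasing_by exact Nat.div_lt_self (Nat.succ_pos _) (by norm_num)

def pvDefault (can_id : Int) : String :=
  "CAN_ID_0x" ++ PySem.Str.zfill (String.mk ((if can_id < 0 then ['-'] else []) ++
    (if can_id = 0 then ['0'] else pvHexAux can_id.natAbs []))) 3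

-- ===== PORT A =====
def pvRangesA : List ((Int × Int) × List String) :=
  [ ((0x100, 0x1FF), ["Engine_RPM", "Engine_Load", "Throttle_Position", "Engine_Temp"]),
    ((0x200, 0x2FF), ["Vehicle_Speed", "Transmission_Gear", "Brake_Pressure", "Steering_Angle"]),
    ((0x300, 0x3FF), ["Fuel_Level", "Oil_Pressure", "Coolant_Pressure", "Turbo_Boost"]),
    ((0x400, 0x4FF), ["Battery_Voltage", "Alternator_Current", "Fuel_Pressure", "Idle_RPM"]),
    ((0x500, 0x5FF), ["Catalyst_Temp", "O2_Sensor", "MAF_Sensor", "IAT_Sensor"]),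
    ((0x600, 0x6FF), ["ABS_Status", "ESP_Status", "Airbag_Status", "Central_Lock"]) ]

def pvLoopA (can_id : Int) : List ((Int × Int) × List String) → String
  | [] => pvDefault can_id
  | ((s, e), names) :: rest =>
    if s ≤ can_id ∧ can_id ≤ e then
      PySem.List.pyGetD names (PySem.Int.mod (can_id - s) (names.length : Int)) ""
    else pvLoopA can_id rest

def generate_parameter_name_py (can_id : Int) : String := pvLoopA can_id pvRangesA

-- ===== PORT B =====
def pvTableB : List (List String) :=
  [ ["Engine_RPM", "Engine_Load", "Throttle_Position", "Engine_Temp"],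
    ["Vehicle_Speed", "Transmission_Gear", "Brake_Pressure", "Steering_Angle"],
    ["Fuel_Level", "Oil_Pressure", "Coolant_Pressure", "Turbo_Boost"],
    ["Battery_Voltage", "Alternator_Current", "Fuel_Pressure", "Idle_RPM"],
    ["Catalyst_Temp", "O2_Sensor", "MAF_Sensor", "IAT_Sensor"],
    ["ABS_Status", "ESP_Status", "Airbag_Status", "Central_Lock"] ]

def generate_parameter_name_py_alt (can_id : Int) : String :=
  let high := PySem.Int.floordiv can_id 256
  if 1 ≤ high ∧ high ≤ 6 then
    let names := PySem.List.pyGetD pvTableB (high - 1) []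
    PySem.List.pyGetD names (PySem.Int.mod (PySem.Int.mod can_id 256) (names.length : Int)) ""
  else pvDefault can_id

-- ===== PRECONDITION & SPEC =====
def Spec_generate_parameter_name_py (can_id : Int) (out : String) : Prop := out = generate_parameter_name_py_alt can_id
instance (can_id : Int) (out : String) : Decidable (Spec_generate_parameter_name_py can_id out) := by unfold Spec_generate_parameter_name_py; infer_instance

-- ===== CLAIM (what is proved, stated in full; the proofs are below) =====
def Claim_equal_generate_parameter_name_py : Prop := ∀ (can_id : Int), Dom_generate_parameter_name_py can_id → Spec_generate_parameter_name_py can_id (generate_parameter_name_py can_id)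

-- ===== LEMMAS AND PROOFS =====

-- ===== VERDICT (by name: the statement is the Claim_ definition above) =====
theorem generate_parameter_name_py_spec : Claim_equal_generate_parameter_name_py := by
  intro can_id _
  unfold Spec_generate_parameter_name_py generate_parameter_name_py generate_parameter_name_py_alt
  simp only [pvRangesA, pvLoopA]
  generalize hQ : PySem.Int.floordiv can_id 256 = q
  generalize hR : PySem.Int.mod can_id 256 = r
  have hq : q * 256 + r = can_id := by
    rw [← hQ, ← hR]; exact PySem.Int.floordiv_mul_add_mod can_id 256
  have hr0 : 0 ≤ r := by rw [← hR]; exact PySem.Int.mod_nonneg can_id (by norm_num)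
  have hr1 : r < 256 := by rw [← hR]; exact PySem.Int.mod_lt can_id (by norm_num)
  split_ifs <;> try (exfalso; omega)
  · have h1 : q = 1 := by omega
    subst h1
    rw [show can_id - (256:Int) = r by omega]
    rfl
  · have h1 : q = 2 := by omega
    subst h1
    rw [show can_id - (512:Int) = r by omega]
    rfl
  · have h1 : q = 3 := by omega
    subst h1
    rw [show can_id - (768:Int) = r by omega]
    rfl
  · have h1 : q = 4 := by omega
    subst h1
    rw [show can_id - (1024:Int) = r by omega]
    rfl
  · have h1 : q = 5 := by omega
    subst h1
    rw [show can_id - (1280:Int) = r by omega]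
    rfl
  · have h1 : q = 6 := by omega
    subst h1
    rw [show can_id - (1536:Int) = r by omega]
    rfl
  · rfl
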